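-- pv_equiv track=rewrite | github.com/peternehl/quarex-website | libraries/_utils/book-auto-tagger.py | find_multiple_tags
-- ===== SOURCE A (Python) =====
-- from typing import Dict, List, Set, Optional
--
-- def normalize_text(text: str) -> str:
--     """Normalize text for matching."""
--     return text.lower().strip()
--
-- def find_multiple_tags(text: str, keyword_map: Dict[str, List[str]], valid_tags: Set[str],
--                        exclude: Set[str] = None, limit: int = 3) -> List[str]:
--     """Find multiple matching tags, excluding already-used ones."""
--     if exclude is None:
--         exclude = set()
--
--     text_lower = normalize_text(text)
--     scores = {}
--
--     for tag, keywords in keyword_map.items():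
--         if tag not in valid_tags or tag in exclude:
--             continue
--         score = 0
--         for keyword in keywords:
--             if keyword.lower() in text_lower:
--                 score += len(keyword.split())
--         if score > 0:
--             scores[tag] = score
--
--     sorted_tags = sorted(scores.keys(), key=lambda t: scores[t], reverse=True)
--     return sorted_tags[:limit]
-- ===== SOURCE B (Python) =====
-- def find_multiple_tags(text, keyword_map, valid_tags, exclude=None, limit=3):
--     """Single pass over the keyword map, keeping an insertion-ordered ranking
--     list keyed by (-score, arrival index) instead of a score dict + sorted()."""
--     banned = exclude if exclude is not None else set()
--     t = text.lower().strip()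
--     ranked = []  # ascending by (-score, index); distinct keys, so order is total
--     for idx, (tag, kws) in enumerate(keyword_map.items()):
--         if tag in valid_tags and tag not in banned:
--             score = sum(len(kw.split()) for kw in kws if kw.lower() in t)
--             if score > 0:
--                 key = (-score, idx)
--                 pos = 0
--                 while pos < len(ranked) and ranked[pos][0] < key:
--                     pos += 1
--                 ranked.insert(pos, (key, tag))
--     return [tag for _, tag in ranked[:limit]]
-- ===== Notes on version B (the rewrite author's own statement) =====
-- stated objective: alternative
-- what changed: B replaces A's score dict plus library stable reverse-sort with a single pass that keeps a ranking list ordered online by the composite key (-score, arrival index); Pre_ only requires the association-list encoding of the dict keyword_map to have distinct keys, as every Python dict does.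
import Mathlib
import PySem

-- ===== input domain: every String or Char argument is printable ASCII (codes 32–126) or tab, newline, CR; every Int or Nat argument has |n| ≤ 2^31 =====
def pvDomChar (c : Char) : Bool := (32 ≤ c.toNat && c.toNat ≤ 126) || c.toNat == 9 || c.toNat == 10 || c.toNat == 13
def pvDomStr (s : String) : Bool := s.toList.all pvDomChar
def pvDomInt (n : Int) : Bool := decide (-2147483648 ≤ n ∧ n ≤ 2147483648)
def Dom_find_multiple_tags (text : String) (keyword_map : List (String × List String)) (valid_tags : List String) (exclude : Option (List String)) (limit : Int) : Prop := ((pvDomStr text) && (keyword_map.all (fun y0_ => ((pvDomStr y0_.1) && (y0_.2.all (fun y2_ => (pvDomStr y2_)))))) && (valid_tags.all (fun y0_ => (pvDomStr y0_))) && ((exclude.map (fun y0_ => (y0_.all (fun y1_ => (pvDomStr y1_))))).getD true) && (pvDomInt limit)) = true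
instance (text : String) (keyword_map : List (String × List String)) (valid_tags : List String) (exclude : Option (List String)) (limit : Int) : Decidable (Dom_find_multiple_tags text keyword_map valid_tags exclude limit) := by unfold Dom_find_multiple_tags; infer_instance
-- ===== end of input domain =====

-- B replaces A's score dict + library stable reverse-sort by a single pass keeping a ranking
-- list ordered online by the composite key (-score, arrival index); same return value.

-- ===== PORT A =====
-- helper: normalize_text(text) = text.lower().strip()
def normalize_text (text : String) : String :=
  PySem.Str.strip (PySem.Str.lower text)

def find_multiple_tags (text : String) (keyword_map : List (String × List String)) (valid_tags : List String) (exclude : Option (List String)) (limit : Int) : List String :=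
  -- if exclude is None: exclude = set()
  let excl : PySem.Set String := exclude.getD []
  let text_lower := normalize_text text
  -- for tag, keywords in keyword_map.items(): … scores[tag] = score
  let scores : PySem.Dict String Int :=
    keyword_map.foldl (fun d p =>
      if !(PySem.Set.contains valid_tags p.1) || PySem.Set.contains excl p.1 then d
      else
        let score : Int := p.2.foldl (fun s kw =>
          if PySem.Str.isIn (PySem.Str.lower kw) text_lower then
            s + ((PySem.Str.split₀ kw).length : Int)
          else s) 0
        if score > 0 then d.insert p.1 score else d) PySem.Dict.empty
  -- sorted(scores.keys(), key=lambda t: scores[t], reverse=True)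
  let sorted_tags := PySem.List.sorted scores.keys (fun t => scores.getD t 0) true
  PySem.List.slice sorted_tags none (some limit)

-- ===== PORT B =====
-- the while/insert loop of Source B: walk past entries whose (lexicographically compared,
-- as Python compares tuples) key is < the new key, insert there
def pvInsertRanked (x : (Int × Int) × String) : List ((Int × Int) × String) → List ((Int × Int) × String)
  | [] => [x]
  | y :: ys =>
      if y.1.1 < x.1.1 ∨ (y.1.1 = x.1.1 ∧ y.1.2 < x.1.2) then y :: pvInsertRanked x ys
      else x :: y :: ys

def find_multiple_tags_alt (text : String) (keyword_map : List (String × List String)) (valid_tags : List String) (exclude : Option (List String)) (limit : Int) : List String :=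
  let banned : PySem.Set String := exclude.getD []
  let t := PySem.Str.strip (PySem.Str.lower text)
  -- for idx, (tag, kws) in enumerate(keyword_map.items()): …
  let ranked : List ((Int × Int) × String) :=
    (PySem.List.enumerate keyword_map).foldl (fun r p =>
      if PySem.Set.contains valid_tags p.2.1 && !(PySem.Set.contains banned p.2.1) then
        -- score = sum(len(kw.split()) for kw in kws if kw.lower() in t)
        let score : Int :=
          ((p.2.2.filter (fun kw => PySem.Str.isIn (PySem.Str.lower kw) t)).map
            (fun kw => ((PySem.Str.split₀ kw).length : Int))).sum
        if 0 < score then pvInsertRanked ((-score, p.1), p.2.1) r else r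
      else r) []
  -- [tag for _, tag in ranked[:limit]]
  (PySem.List.slice ranked none (some limit)).map (·.2)

-- ===== PRECONDITION & SPEC =====
-- Pre_ requires the association-list encoding of the Python dict keyword_map to have distinct
-- keys — every actual Python dict satisfies this; on duplicate-key lists the encoding is
-- ambiguous (dict formation would already have collapsed them), so nothing is claimed there.
def Pre_find_multiple_tags (text : String) (keyword_map : List (String × List String)) (valid_tags : List String) (exclude : Option (List String)) (limit : Int) : Prop :=
  (keyword_map.map (·.1)).Nodup
instance (text : String) (keyword_map : List (String × List String)) (valid_tags : List String) (exclude : Option (List String)) (limit : Int) : Decidable (Pre_find_multiple_tags text keyword_map valid_tags exclude limit) := by unfold Pre_find_multiple_tags; infer_instance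

def pvWitness_find_multiple_tags : String × (List (String × List String)) × List String × Option (List String) × Int :=
  ("war and peace", [("war", ["war", "and peace"]), ("cat", ["cat"])], ["war", "cat"], none, 3)

def Spec_find_multiple_tags (text : String) (keyword_map : List (String × List String)) (valid_tags : List String) (exclude : Option (List String)) (limit : Int) (out : List String) : Prop := out = find_multiple_tags_alt text keyword_map valid_tags exclude limit
instance (text : String) (keyword_map : List (String × List String)) (valid_tags : List String) (exclude : Option (List String)) (limit : Int) (out : List String) : Decidable (Spec_find_multiple_tags text keyword_map valid_tags exclude limit out) := by unfold Spec_find_multiple_tags; infer_instance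

-- ===== CLAIM (what is proved, stated in full; the proofs are below) =====
def Claim_equal_find_multiple_tags : Prop := ∀ (text : String) (keyword_map : List (String × List String)) (valid_tags : List String) (exclude : Option (List String)) (limit : Int), Dom_find_multiple_tags text keyword_map valid_tags exclude limit → Pre_find_multiple_tags text keyword_map valid_tags exclude limit → Spec_find_multiple_tags text keyword_map valid_tags exclude limit (find_multiple_tags text keyword_map valid_tags exclude limit)

-- ===== LEMMAS AND PROOFS =====

-- conditional-update loops are loops over the filtered list
theorem pv_foldl_filter {α β : Type} (g : α → Bool) (h : β → α → β) (l : List α) (init : β) :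
    l.foldl (fun d p => if g p then h d p else d) init = (l.filter g).foldl h init := by
  induction l generalizing init with
  | nil => rfl
  | cons a l ih =>
      by_cases hg : g a = true <;> simp [hg, ih]

-- A's per-tag scoring loop computes B's sum-of-map-of-filter
theorem pv_score_eq {α : Type} (p : α → Bool) (f : α → Int) (kws : List α) (acc : Int) :
    kws.foldl (fun s kw => if p kw then s + f kw else s) acc
    = acc + ((kws.filter p).map f).sum := by
  induction kws generalizing acc with
  | nil => simp
  | cons a l ih =>
      by_cases hg : p a = true <;> simp [hg, ih, add_assoc]

-- slicing commutes with map
theorem pv_map_slice {α β : Type} (f : α → β) (xs : List α) (a? b? : Option Int) :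
    (PySem.List.slice xs a? b?).map f = PySem.List.slice (xs.map f) a? b? := by
  simp [PySem.List.slice, List.map_take, List.map_drop]

-- getD on a dict whose items are a Nodup-key literal association list
theorem pv_getD_of_mem_items {pairs : List (String × Int)} {d : PySem.Dict String Int}
    (hitems : d.items = pairs) (hnd : (pairs.map (·.1)).Nodup) {p : String × Int}
    (hp : p ∈ pairs) : d.getD p.1 0 = p.2 := by
  have hd : d = PySem.Dict.mk pairs := by
    apply PySem.Dict.ext; simpa using hitems
  subst hd
  clear hitems
  induction pairs with
  | nil => cases hp
  | cons a rest ih =>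
      obtain ⟨ka, va⟩ := a
      simp only [List.map_cons, List.nodup_cons, List.mem_map] at hnd
      rcases List.mem_cons.mp hp with h | h
      · subst h
        simp [PySem.Dict.getD, PySem.Dict.get?_mk_cons]
      · have hne : ka ≠ p.1 := fun he => hnd.1 ⟨p, h, he.symm⟩
        have := ih (by simpa using hnd.2) h
        simpa [PySem.Dict.getD, PySem.Dict.get?_mk_cons, hne] using this

-- membership in the result of the ranked insertion
theorem pv_mem_insertRanked {x y : (Int × Int) × String} {l : List ((Int × Int) × String)}
    (h : y ∈ pvInsertRanked x l) : y = x ∨ y ∈ l := by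
  induction l with
  | nil => simpa [pvInsertRanked] using h
  | cons a l ih =>
      by_cases hc : a.1.1 < x.1.1 ∨ (a.1.1 = x.1.1 ∧ a.1.2 < x.1.2)
      · simp only [pvInsertRanked, if_pos hc, List.mem_cons] at h
        rcases h with h | h
        · exact Or.inr (by simp [h])
        · rcases ih h with h | h
          · exact Or.inl h
          · exact Or.inr (by simp [h])
      · simp only [pvInsertRanked, if_neg hc, List.mem_cons] at h
        rcases h with h | h | h <;> simp [h]

-- one ranked insertion projects to one stable reverse-sort insertion
theorem pv_insert_step (k : String → Int) (tag : String) (n : Int)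
    (R : List ((Int × Int) × String))
    (hR : ∀ y ∈ R, y.1.1 = -(k y.2) ∧ y.1.2 < n) :
    (pvInsertRanked ((-(k tag), n), tag) R).map (·.2)
      = PySem.List.insertBy (fun a b => decide (k b < k a)) tag (R.map (·.2)) := by
  induction R with
  | nil => simp [pvInsertRanked, PySem.List.insertBy]
  | cons y R ih =>
      obtain ⟨hy1, hy2⟩ := hR y (by simp)
      have hrec := ih (fun z hz => hR z (by simp [hz]))
      by_cases hlt : k y.2 < k tag
      · have hc : ¬ (y.1.1 < -(k tag) ∨ (y.1.1 = -(k tag) ∧ y.1.2 < n)) := by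
          rw [hy1]; omega
        simp [pvInsertRanked, hc, PySem.List.insertBy, hlt]
      · have hc : y.1.1 < -(k tag) ∨ (y.1.1 = -(k tag) ∧ y.1.2 < n) := by
          rw [hy1]; omega
        simp [pvInsertRanked, hc, PySem.List.insertBy, hlt, hrec]

-- the whole B ranking loop projects to A's stable reverse sort (both as insertBy folds)
theorem pv_core (k : String → Int) (sc : List String → Int)
    (E : List (Int × String × List String))
    (R : List ((Int × Int) × String))
    (hmono : E.Pairwise (fun p q => p.1 < q.1))
    (hbound : ∀ y ∈ R, ∀ p ∈ E, y.1.2 < p.1)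
    (hRinv : ∀ y ∈ R, y.1.1 = -(k y.2))
    (hk : ∀ p ∈ E, k p.2.1 = sc p.2.2) :
    (E.foldl (fun r p => pvInsertRanked ((-(sc p.2.2), p.1), p.2.1) r) R).map (·.2)
      = (E.map (·.2.1)).foldl
          (fun acc x => PySem.List.insertBy (fun a b => decide (k b < k a)) x acc)
          (R.map (·.2)) := by
  induction E generalizing R with
  | nil => simp
  | cons e E ih =>
      have hkp : sc e.2.2 = k e.2.1 := (hk e (by simp)).symm
      have hR : ∀ y ∈ R, y.1.1 = -(k y.2) ∧ y.1.2 < e.1 := fun y hy =>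
        ⟨hRinv y hy, hbound y hy e (by simp)⟩
      have hstep := pv_insert_step k e.2.1 e.1 R hR
      have hhead : ∀ q ∈ E, e.1 < q.1 := (List.pairwise_cons.mp hmono).1
      have hb' : ∀ y ∈ pvInsertRanked ((-(k e.2.1), e.1), e.2.1) R, ∀ q ∈ E, y.1.2 < q.1 := by
        intro y hy q hq
        rcases pv_mem_insertRanked hy with h | h
        · subst h; exact hhead q hq
        · exact lt_trans (hbound y h e (by simp)) (hhead q hq)
      have hi' : ∀ y ∈ pvInsertRanked ((-(k e.2.1), e.1), e.2.1) R, y.1.1 = -(k y.2) := by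
        intro y hy
        rcases pv_mem_insertRanked hy with h | h
        · subst h; rfl
        · exact hRinv y h
      simp only [List.foldl_cons, List.map_cons]
      rw [hkp]
      rw [ih (pvInsertRanked ((-(k e.2.1), e.1), e.2.1) R) (List.pairwise_cons.mp hmono).2
        hb' hi' (fun q hq => hk q (List.mem_cons_of_mem _ hq)), hstep]

-- proof-side abbreviations: the keyword predicate, the per-tag score, the qualifying filter, A's dict
def pvPred (text : String) (kw : String) : Bool :=
  PySem.Str.isIn (PySem.Str.lower kw) (PySem.Str.strip (PySem.Str.lower text))

def pvSc (text : String) (kws : List String) : Int :=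
  ((kws.filter (pvPred text)).map (fun kw => ((PySem.Str.split₀ kw).length : Int))).sum

def pvG (text : String) (vt excl : List String) (p : String × List String) : Bool :=
  (PySem.Set.contains vt p.1 && !(PySem.Set.contains excl p.1)) && decide (0 < pvSc text p.2)

def pvD (text : String) (vt excl : List String) (km : List (String × List String)) : PySem.Dict String Int :=
  (km.filter (pvG text vt excl)).foldl (fun d p => d.insert p.1 (pvSc text p.2)) PySem.Dict.empty

-- A's dict-building loop is the fold of plain inserts over the filtered map
theorem pvA_fold (text : String) (km : List (String × List String)) (vt : List String)
    (ex : Option (List String)) :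
    km.foldl (fun d p =>
      if !(PySem.Set.contains vt p.1) || PySem.Set.contains (ex.getD []) p.1 then d
      else
        if p.2.foldl (fun s kw =>
            if PySem.Str.isIn (PySem.Str.lower kw) (normalize_text text) then
              s + ((PySem.Str.split₀ kw).length : Int)
            else s) 0 > 0 then
          d.insert p.1 (p.2.foldl (fun s kw =>
            if PySem.Str.isIn (PySem.Str.lower kw) (normalize_text text) then
              s + ((PySem.Str.split₀ kw).length : Int)
            else s) 0)
        else d) PySem.Dict.empty
    = pvD text vt (ex.getD []) km := by
  unfold pvD
  rw [← pv_foldl_filter]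
  have hpred : pvPred text = fun kw =>
      PySem.Chars.isIn (PySem.Chars.lower kw.toList)
        (PySem.Chars.strip (PySem.Chars.lower text.toList)) := by
    funext kw; simp [pvPred]
  have hfun : (fun (d : PySem.Dict String Int) (p : String × List String) =>
      if !(PySem.Set.contains vt p.1) || PySem.Set.contains (ex.getD []) p.1 then d
      else
        if p.2.foldl (fun s kw =>
            if PySem.Str.isIn (PySem.Str.lower kw) (normalize_text text) then
              s + ((PySem.Str.split₀ kw).length : Int)
            else s) 0 > 0 then
          d.insert p.1 (p.2.foldl (fun s kw =>
            if PySem.Str.isIn (PySem.Str.lower kw) (normalize_text text) then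
              s + ((PySem.Str.split₀ kw).length : Int)
            else s) 0)
        else d)
      = (fun d p => if pvG text vt (ex.getD []) p then d.insert p.1 (pvSc text p.2) else d) := by
    funext d p
    by_cases h1 : p.1 ∈ vt <;> by_cases h2 : p.1 ∈ ex.getD [] <;>
      simp [normalize_text, pvG, pvSc, hpred, pv_score_eq, h1, h2]
  rw [hfun]

theorem pvA_eq (text : String) (km : List (String × List String)) (vt : List String)
    (ex : Option (List String)) (lim : Int) :
    find_multiple_tags text km vt ex lim
      = PySem.List.slice
          (PySem.List.sorted (pvD text vt (ex.getD []) km).keys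
            (fun t => (pvD text vt (ex.getD []) km).getD t 0) true)
          none (some lim) := by
  simp only [find_multiple_tags]
  rw [pvA_fold]

-- B's ranking loop is the fold of insertions over the filtered enumerated map
theorem pvB_eq (text : String) (km : List (String × List String)) (vt : List String)
    (ex : Option (List String)) (lim : Int) :
    find_multiple_tags_alt text km vt ex lim
      = (PySem.List.slice
          (((PySem.List.enumerate km).filter (fun p => pvG text vt (ex.getD []) p.2)).foldl
            (fun r p => pvInsertRanked ((-(pvSc text p.2.2), p.1), p.2.1) r) [])
          none (some lim)).map (·.2) := by
  simp only [find_multiple_tags_alt]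
  rw [← pv_foldl_filter]
  have hpred : pvPred text = fun kw =>
      PySem.Chars.isIn (PySem.Chars.lower kw.toList)
        (PySem.Chars.strip (PySem.Chars.lower text.toList)) := by
    funext kw; simp [pvPred]
  have hfun : (fun (r : List ((Int × Int) × String)) (p : Int × String × List String) =>
      if PySem.Set.contains vt p.2.1 && !(PySem.Set.contains (ex.getD []) p.2.1) then
        if 0 < ((p.2.2.filter (fun kw =>
              PySem.Str.isIn (PySem.Str.lower kw) (PySem.Str.strip (PySem.Str.lower text)))).map
            (fun kw => ((PySem.Str.split₀ kw).length : Int))).sum then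
          pvInsertRanked ((-(((p.2.2.filter (fun kw =>
              PySem.Str.isIn (PySem.Str.lower kw) (PySem.Str.strip (PySem.Str.lower text)))).map
            (fun kw => ((PySem.Str.split₀ kw).length : Int))).sum), p.1), p.2.1) r
        else r
      else r)
      = (fun r p => if pvG text vt (ex.getD []) p.2 then
          pvInsertRanked ((-(pvSc text p.2.2), p.1), p.2.1) r else r) := by
    funext r p
    by_cases h1 : p.2.1 ∈ vt <;> by_cases h2 : p.2.1 ∈ ex.getD [] <;>
      simp [pvG, pvSc, hpred, h1, h2]
  rw [hfun]

-- filtering commutes with enumerate (projecting the payloads back out)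
theorem pv_enum_filter {α : Type} (g : α → Bool) (l : List α) (s : Int) :
    ((PySem.List.enumerate l s).filter (fun p => g p.2)).map (·.2) = l.filter g := by
  induction l generalizing s with
  | nil => simp [PySem.List.enumerate_nil]
  | cons a l ih =>
      by_cases hg : g a = true <;>
        simp [PySem.List.enumerate_cons, hg, ih]

-- enumerate produces strictly increasing indices
theorem pv_enum_pairwise {α : Type} (l : List α) (s : Int) :
    (PySem.List.enumerate l s).Pairwise (fun p q => p.1 < q.1) := by
  have h := PySem.List.pairwise_lt_pyRange_one s (s + l.length)
  rw [← PySem.List.map_fst_enumerate] at h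
  exact List.pairwise_map.mp h

-- ===== VERDICT (by name: the statement is the Claim_ definition above) =====
theorem find_multiple_tags_spec : Claim_equal_find_multiple_tags := by
  intro text km vt ex lim _ hpre
  unfold Spec_find_multiple_tags
  have hndF : ((km.filter (pvG text vt (ex.getD []))).map (·.1)).Nodup := by
    refine List.Nodup.sublist ?_ hpre
    exact List.Sublist.map _ List.filter_sublist
  have hfresh : ∀ a ∈ km.filter (pvG text vt (ex.getD [])),
      (PySem.Dict.empty : PySem.Dict String Int).contains a.1 = false := by
    intro a _; simp [PySem.Dict.empty, PySem.Dict.contains]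
  have hitems : (pvD text vt (ex.getD []) km).items
      = (km.filter (pvG text vt (ex.getD []))).map (fun p => (p.1, pvSc text p.2)) := by
    unfold pvD
    rw [PySem.Dict.items_foldl_insert_fresh _ (·.1) (fun p => pvSc text p.2)
      PySem.Dict.empty hfresh hndF]
    simp [PySem.Dict.empty]
  have hkeys : (pvD text vt (ex.getD []) km).keys
      = (km.filter (pvG text vt (ex.getD []))).map (·.1) := by
    simp only [PySem.Dict.keys, hitems, List.map_map]
    rfl
  have hkey_of_mem : ∀ p ∈ km.filter (pvG text vt (ex.getD [])),
      (pvD text vt (ex.getD []) km).getD p.1 0 = pvSc text p.2 := by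
    intro p hp
    exact pv_getD_of_mem_items hitems (by simpa [List.map_map] using hndF)
      (List.mem_map_of_mem hp)
  have hE2 : ((PySem.List.enumerate km).filter (fun p => pvG text vt (ex.getD []) p.2)).map (·.2)
      = km.filter (pvG text vt (ex.getD [])) :=
    pv_enum_filter (pvG text vt (ex.getD [])) km 0
  have hmono : ((PySem.List.enumerate km).filter
      (fun p => pvG text vt (ex.getD []) p.2)).Pairwise (fun p q => p.1 < q.1) :=
    List.Pairwise.filter _ (pv_enum_pairwise km 0)
  have hk : ∀ p ∈ (PySem.List.enumerate km).filter (fun p => pvG text vt (ex.getD []) p.2),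
      (pvD text vt (ex.getD []) km).getD p.2.1 0 = pvSc text p.2.2 := by
    intro p hp
    have hmem : p.2 ∈ km.filter (pvG text vt (ex.getD [])) := by
      rw [← hE2]; exact List.mem_map_of_mem hp
    exact hkey_of_mem p.2 hmem
  have hcore := pv_core (fun t => (pvD text vt (ex.getD []) km).getD t 0) (pvSc text)
    ((PySem.List.enumerate km).filter (fun p => pvG text vt (ex.getD []) p.2)) [] hmono
    (by simp) (by simp) hk
  have hEtags : ((PySem.List.enumerate km).filter
      (fun p => pvG text vt (ex.getD []) p.2)).map (·.2.1)
      = (km.filter (pvG text vt (ex.getD []))).map (·.1) := by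
    rw [← hE2, List.map_map]; rfl
  rw [pvA_eq, pvB_eq, pv_map_slice, hcore]
  simp only [List.map_nil]
  rw [hEtags, ← hkeys, ← PySem.List.sorted_rev_eq_foldl_insertBy]
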